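-- pv_equiv track=rewrite | github.com/hsyhhssyy/amiyabot-game-hsyhhssyy-skill-schulte-grid | game_builders/continuous_mode.py | find_max_surrounded
-- ===== SOURCE A (Python) =====
-- def find_max_surrounded(puzzle):
--     max_surrounded = 0
--     max_coords = []
--     for y in range(len(puzzle)):
--         for x in range(len(puzzle[0])):
--             if puzzle[y][x] == 0:
--                 surrounded = count_surrounded(puzzle, x, y)
--                 if surrounded > max_surrounded:
--                     max_surrounded = surrounded
--                     max_coords = [(x, y)]
--                 elif surrounded == max_surrounded:
--                     max_coords.append((x, y))
--     return sorted(max_coords, key=lambda coord: count_surrounded(puzzle, coord[0], coord[1]), reverse=True)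
--
-- def count_surrounded(puzzle, x, y):
--     surrounded = 0
--     if puzzle[y][x] == 0:
--         if x == 0 or x == len(puzzle[0]) - 1 or y == 0 or y == len(puzzle) - 1:
--             surrounded += 1
--         if x > 0 and puzzle[y][x-1] == 1:
--             surrounded += 1
--         if x < len(puzzle[0]) - 1 and puzzle[y][x+1] == 1:
--             surrounded += 1
--         if y > 0 and puzzle[y-1][x] == 1:
--             surrounded += 1
--         if y < len(puzzle) - 1 and puzzle[y+1][x] == 1:
--             surrounded += 1
--     return surrounded
-- ===== SOURCE B (Python) =====
-- def count_surrounded(puzzle, x, y):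
--     surrounded = 0
--     if puzzle[y][x] == 0:
--         if x == 0 or x == len(puzzle[0]) - 1 or y == 0 or y == len(puzzle) - 1:
--             surrounded += 1
--         if x > 0 and puzzle[y][x-1] == 1:
--             surrounded += 1
--         if x < len(puzzle[0]) - 1 and puzzle[y][x+1] == 1:
--             surrounded += 1
--         if y > 0 and puzzle[y-1][x] == 1:
--             surrounded += 1
--         if y < len(puzzle) - 1 and puzzle[y+1][x] == 1:
--             surrounded += 1
--     return surrounded
--
-- def find_max_surrounded(puzzle):
--     # counting-sort-style buckets: a count is always in 0..5 (border bonus + 4 neighbours)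
--     buckets = [[] for _ in range(6)]
--     for y in range(len(puzzle)):
--         for x in range(len(puzzle[0])):
--             if puzzle[y][x] == 0:
--                 buckets[count_surrounded(puzzle, x, y)].append((x, y))
--     for c in range(5, 0, -1):
--         if buckets[c]:
--             return buckets[c]
--     return buckets[0]
-- ===== Notes on version B (the rewrite author's own statement) =====
-- stated objective: alternative
-- what changed: Replaces A's online running-max-with-reset pass plus a redundant final stable sort by a counting-sort bucketing: one pass drops each empty cell into buckets[count] (counts are always 0..5), then the highest nonempty bucket is returned directly, with no max tracking and no sort.
import Mathlib
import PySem

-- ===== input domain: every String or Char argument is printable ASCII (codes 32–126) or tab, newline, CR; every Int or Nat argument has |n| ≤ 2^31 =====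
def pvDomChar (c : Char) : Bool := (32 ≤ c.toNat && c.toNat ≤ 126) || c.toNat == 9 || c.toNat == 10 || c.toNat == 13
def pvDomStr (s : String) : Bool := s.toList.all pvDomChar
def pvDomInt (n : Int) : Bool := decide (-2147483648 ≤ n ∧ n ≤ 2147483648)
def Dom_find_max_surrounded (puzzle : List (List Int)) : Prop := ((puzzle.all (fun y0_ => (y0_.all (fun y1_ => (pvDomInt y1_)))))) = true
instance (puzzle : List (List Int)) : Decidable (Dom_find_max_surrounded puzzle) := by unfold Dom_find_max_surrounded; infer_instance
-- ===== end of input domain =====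

-- B replaces A's running-max pass (reset on a new max) followed by a redundant stable sort by a
-- counting-sort bucketing (counts are always 0..5); same return value, objective: alternative.

-- ===== PORT A =====
-- puzzle[y][x]; total with defaults — every access is in range on the inputs Pre_ admits
def pvAt (puzzle : List (List Int)) (y x : Int) : Int :=
  PySem.List.pyGetD (PySem.List.pyGetD puzzle y []) x 0

def count_surrounded (puzzle : List (List Int)) (x y : Int) : Int :=
  let w : Int := (PySem.List.pyGetD puzzle 0 ([] : List Int)).length
  let h : Int := puzzle.length
  if pvAt puzzle y x = 0 then
    (if x = 0 ∨ x = w - 1 ∨ y = 0 ∨ y = h - 1 then (1 : Int) else 0)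
    + (if 0 < x ∧ pvAt puzzle y (x - 1) = 1 then 1 else 0)
    + (if x < w - 1 ∧ pvAt puzzle y (x + 1) = 1 then 1 else 0)
    + (if 0 < y ∧ pvAt puzzle (y - 1) x = 1 then 1 else 0)
    + (if y < h - 1 ∧ pvAt puzzle (y + 1) x = 1 then 1 else 0)
  else 0

def find_max_surrounded (puzzle : List (List Int)) : List (Int × Int) :=
  let st :=
    (PySem.List.pyRange 0 puzzle.length 1).foldl (fun st y =>
      (PySem.List.pyRange 0 (PySem.List.pyGetD puzzle 0 ([] : List Int)).length 1).foldl (fun st x =>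
        if pvAt puzzle y x = 0 then
          let surrounded := count_surrounded puzzle x y
          if st.1 < surrounded then (surrounded, [((x : Int), (y : Int))])
          else if surrounded = st.1 then (st.1, st.2 ++ [(x, y)])
          else st
        else st) st)
      ((0 : Int), ([] : List (Int × Int)))
  PySem.List.sorted st.2 (fun coord => count_surrounded puzzle coord.1 coord.2) true

-- ===== PORT B =====
-- the six buckets `buckets = [[] for _ in range(6)]` of Source B
structure PvBuckets where
  b0 : List (Int × Int)
  b1 : List (Int × Int)
  b2 : List (Int × Int)
  b3 : List (Int × Int)
  b4 : List (Int × Int)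
  b5 : List (Int × Int)
deriving DecidableEq, Repr

-- buckets[c].append(p); c = count_surrounded is always in 0..5 (proved below), so the
-- if-chain on the index is exact and the final `else b` branch is never reached
def pvBucketAdd (b : PvBuckets) (c : Int) (p : Int × Int) : PvBuckets :=
  if c = 0 then { b with b0 := b.b0 ++ [p] }
  else if c = 1 then { b with b1 := b.b1 ++ [p] }
  else if c = 2 then { b with b2 := b.b2 ++ [p] }
  else if c = 3 then { b with b3 := b.b3 ++ [p] }
  else if c = 4 then { b with b4 := b.b4 ++ [p] }
  else if c = 5 then { b with b5 := b.b5 ++ [p] }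
  else b

def find_max_surrounded_alt (puzzle : List (List Int)) : List (Int × Int) :=
  let b :=
    (PySem.List.pyRange 0 puzzle.length 1).foldl (fun b y =>
      (PySem.List.pyRange 0 (PySem.List.pyGetD puzzle 0 ([] : List Int)).length 1).foldl (fun b x =>
        if pvAt puzzle y x = 0 then pvBucketAdd b (count_surrounded puzzle x y) (x, y)
        else b) b)
      ⟨[], [], [], [], [], []⟩
  -- `for c in range(5, 0, -1): if buckets[c]: return buckets[c]` then `return buckets[0]`
  if b.b5 ≠ [] then b.b5
  else if b.b4 ≠ [] then b.b4
  else if b.b3 ≠ [] then b.b3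
  else if b.b2 ≠ [] then b.b2
  else if b.b1 ≠ [] then b.b1
  else b.b0

-- ===== PRECONDITION & SPEC =====
-- Pre_ excludes exactly the ragged puzzles on which A raises IndexError (a row shorter than row 0)
def Pre_find_max_surrounded (puzzle : List (List Int)) : Prop :=
  ∀ row ∈ puzzle, (puzzle.headD []).length ≤ row.length
instance (puzzle : List (List Int)) : Decidable (Pre_find_max_surrounded puzzle) := by
  unfold Pre_find_max_surrounded; infer_instance

def pvWitness_find_max_surrounded : List (List Int) := [[0, 1], [1, 0]]

def Spec_find_max_surrounded (puzzle : List (List Int)) (out : List (Int × Int)) : Prop := out = find_max_surrounded_alt puzzle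
instance (puzzle : List (List Int)) (out : List (Int × Int)) : Decidable (Spec_find_max_surrounded puzzle out) := by unfold Spec_find_max_surrounded; infer_instance

-- ===== CLAIM (what is proved, stated in full; the proofs are below) =====
def Claim_equal_find_max_surrounded : Prop := ∀ (puzzle : List (List Int)), Dom_find_max_surrounded puzzle → Pre_find_max_surrounded puzzle → Spec_find_max_surrounded puzzle (find_max_surrounded puzzle)

-- ===== LEMMAS AND PROOFS =====

-- the step function of A's running-max loop, acting on one (coord, count) entry
def pvStep (st : Int × List (Int × Int)) (e : (Int × Int) × Int) : Int × List (Int × Int) :=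
  if st.1 < e.2 then (e.2, [e.1])
  else if e.2 = st.1 then (st.1, st.2 ++ [e.1])
  else st

-- the (coord, count) entries of the zero cells, in row-major order
def pvEntries (puzzle : List (List Int)) : List ((Int × Int) × Int) :=
  (PySem.List.pyRange 0 puzzle.length 1).flatMap (fun y =>
    ((PySem.List.pyRange 0 (PySem.List.pyGetD puzzle 0 ([] : List Int)).length 1).filter
        (fun x => pvAt puzzle y x == 0)).map
      (fun x => (((x : Int), (y : Int)), count_surrounded puzzle x y)))

lemma count_surrounded_bounds (puzzle : List (List Int)) (x y : Int) :
    0 ≤ count_surrounded puzzle x y ∧ count_surrounded puzzle x y ≤ 5 := by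
  unfold count_surrounded
  dsimp only
  split_ifs <;> omega

lemma pvEntries_count (puzzle : List (List Int)) :
    ∀ e ∈ pvEntries puzzle,
      e.2 = count_surrounded puzzle e.1.1 e.1.2 ∧ 0 ≤ e.2 ∧ e.2 ≤ 5 := by
  intro e he
  unfold pvEntries at he
  simp only [List.mem_flatMap, List.mem_map, List.mem_filter] at he
  obtain ⟨y, _, x, _, rfl⟩ := he
  exact ⟨rfl, count_surrounded_bounds _ _ _⟩

-- A's running-max fold over a list of entries computes (max of counts floored at 0, cells attaining it)
lemma pvFold_step (E : List ((Int × Int) × Int)) :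
    E.foldl pvStep ((0 : Int), ([] : List (Int × Int)))
      = ((E.map Prod.snd).foldl max 0,
         (E.filter (fun e => e.2 == (E.map Prod.snd).foldl max 0)).map Prod.fst) := by
  induction E using List.reverseRecOn with
  | nil => simp
  | append_singleton E e ih =>
    have hmax : ((E ++ [e]).map Prod.snd).foldl max 0
        = max ((E.map Prod.snd).foldl max 0) e.2 := by
      simp [List.foldl_append]
    have hle : ∀ e' ∈ E, e'.2 ≤ (E.map Prod.snd).foldl max 0 := by
      intro e' he'
      exact (PySem.List.le_foldl_max (E.map Prod.snd) 0).2 e'.2 (List.mem_map_of_mem he')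
    rw [List.foldl_append, ih, hmax]
    simp only [List.foldl_cons, List.foldl_nil]
    unfold pvStep
    rcases lt_trichotomy ((E.map Prod.snd).foldl max 0) e.2 with h | h | h
    · have hfE : E.filter (fun e' => e'.2 == e.2) = [] := by
        refine List.filter_eq_nil_iff.2 (fun e' he' => ?_)
        simp only [beq_iff_eq]
        exact fun hc => absurd (hc ▸ hle e' he') (not_le.2 h)
      simp [h, max_eq_right h.le, List.filter_append, hfE]
    · simp [← h, List.filter_append]
    · have h1 : ¬ ((E.map Prod.snd).foldl max 0 < e.2) := by omega
      have h2 : e.2 ≠ (E.map Prod.snd).foldl max 0 := ne_of_lt h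
      simp [h1, h2, max_eq_left h.le, List.filter_append]

-- A's inner loop over one row equals the pvStep fold over that row's entries
lemma findA_inner (puzzle : List (List Int)) (y : Int) (st : Int × List (Int × Int)) :
    (PySem.List.pyRange 0 (PySem.List.pyGetD puzzle 0 ([] : List Int)).length 1).foldl
      (fun st x =>
        if pvAt puzzle y x = 0 then
          let surrounded := count_surrounded puzzle x y
          if st.1 < surrounded then (surrounded, [((x : Int), (y : Int))])
          else if surrounded = st.1 then (st.1, st.2 ++ [(x, y)])
          else st
        else st) st
      = List.foldl pvStep st
          (((PySem.List.pyRange 0 (PySem.List.pyGetD puzzle 0 ([] : List Int)).length 1).filter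
              (fun x => pvAt puzzle y x == 0)).map
            (fun x => (((x : Int), (y : Int)), count_surrounded puzzle x y))) := by
  rw [List.foldl_map, List.foldl_filter]
  congr 1
  funext st' x
  by_cases h : pvAt puzzle y x = 0 <;> simp [h, pvStep]

-- A's nested loop equals the fold of pvStep over the entries
lemma findA_fold (puzzle : List (List Int)) :
    find_max_surrounded puzzle
      = PySem.List.sorted
          ((pvEntries puzzle).foldl pvStep ((0 : Int), ([] : List (Int × Int)))).2
          (fun coord => count_surrounded puzzle coord.1 coord.2) true := by
  unfold find_max_surrounded pvEntries
  rw [List.foldl_flatMap]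
  apply congrArg (fun st : Int × List (Int × Int) =>
    PySem.List.sorted st.2 (fun coord => count_surrounded puzzle coord.1 coord.2) true)
  congr 1
  funext st y
  exact findA_inner puzzle y st

-- B's inner loop over one row equals the bucket fold over that row's entries
lemma findB_inner (puzzle : List (List Int)) (y : Int) (b : PvBuckets) :
    (PySem.List.pyRange 0 (PySem.List.pyGetD puzzle 0 ([] : List Int)).length 1).foldl
      (fun b x =>
        if pvAt puzzle y x = 0 then pvBucketAdd b (count_surrounded puzzle x y) (x, y)
        else b) b
      = List.foldl (fun b e => pvBucketAdd b e.2 e.1) b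
          (((PySem.List.pyRange 0 (PySem.List.pyGetD puzzle 0 ([] : List Int)).length 1).filter
              (fun x => pvAt puzzle y x == 0)).map
            (fun x => (((x : Int), (y : Int)), count_surrounded puzzle x y))) := by
  rw [List.foldl_map, List.foldl_filter]
  congr 1
  funext b' x
  by_cases h : pvAt puzzle y x = 0 <;> simp [h]

-- B's nested loop equals the bucket fold over the entries
lemma findB_fold_aux (puzzle : List (List Int)) :
    (PySem.List.pyRange 0 puzzle.length 1).foldl (fun b y =>
      (PySem.List.pyRange 0 (PySem.List.pyGetD puzzle 0 ([] : List Int)).length 1).foldl (fun b x =>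
        if pvAt puzzle y x = 0 then pvBucketAdd b (count_surrounded puzzle x y) (x, y)
        else b) b) ⟨[], [], [], [], [], []⟩
      = (pvEntries puzzle).foldl (fun b e => pvBucketAdd b e.2 e.1) ⟨[], [], [], [], [], []⟩ := by
  unfold pvEntries
  rw [List.foldl_flatMap]
  congr 1
  funext b y
  exact findB_inner puzzle y b

lemma findB_fold (puzzle : List (List Int)) :
    find_max_surrounded_alt puzzle
      = (fun b : PvBuckets =>
          if b.b5 ≠ [] then b.b5
          else if b.b4 ≠ [] then b.b4
          else if b.b3 ≠ [] then b.b3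
          else if b.b2 ≠ [] then b.b2
          else if b.b1 ≠ [] then b.b1
          else b.b0)
        ((pvEntries puzzle).foldl (fun b e => pvBucketAdd b e.2 e.1) ⟨[], [], [], [], [], []⟩) := by
  unfold find_max_surrounded_alt
  rw [findB_fold_aux]

-- the bucket fold over entries with counts in 0..5 computes the six filters
lemma pvBuckets_filter (E : List ((Int × Int) × Int))
    (hb : ∀ e ∈ E, 0 ≤ e.2 ∧ e.2 ≤ 5) :
    E.foldl (fun b e => pvBucketAdd b e.2 e.1) ⟨[], [], [], [], [], []⟩
      = ⟨(E.filter (fun e => e.2 == 0)).map Prod.fst,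
         (E.filter (fun e => e.2 == 1)).map Prod.fst,
         (E.filter (fun e => e.2 == 2)).map Prod.fst,
         (E.filter (fun e => e.2 == 3)).map Prod.fst,
         (E.filter (fun e => e.2 == 4)).map Prod.fst,
         (E.filter (fun e => e.2 == 5)).map Prod.fst⟩ := by
  induction E using List.reverseRecOn with
  | nil => rfl
  | append_singleton E e ih =>
    have hbE : ∀ e' ∈ E, 0 ≤ e'.2 ∧ e'.2 ≤ 5 := fun e' he' => hb e' (by simp [he'])
    have he : 0 ≤ e.2 ∧ e.2 ≤ 5 := hb e (by simp)
    rw [List.foldl_append, ih hbE]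
    simp only [List.foldl_cons, List.foldl_nil, List.filter_append, List.map_append]
    have : e.2 = 0 ∨ e.2 = 1 ∨ e.2 = 2 ∨ e.2 = 3 ∨ e.2 = 4 ∨ e.2 = 5 := by omega
    rcases this with h | h | h | h | h | h <;>
      simp [pvBucketAdd, h]

-- ===== VERDICT (by name: the statement is the Claim_ definition above) =====
theorem find_max_surrounded_spec : Claim_equal_find_max_surrounded := by
  intro puzzle _ _
  unfold Spec_find_max_surrounded
  rw [findA_fold, pvFold_step, findB_fold,
    pvBuckets_filter _ (fun e he => (pvEntries_count puzzle e he).2)]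
  set E := pvEntries puzzle with hE
  obtain ⟨m, hm⟩ : ∃ m, (E.map Prod.snd).foldl max 0 = m := ⟨_, rfl⟩
  rw [hm]
  have hm0 : 0 ≤ m := hm ▸ (PySem.List.le_foldl_max (E.map Prod.snd) 0).1
  have hle : ∀ e ∈ E, e.2 ≤ m := fun e he =>
    hm ▸ (PySem.List.le_foldl_max (E.map Prod.snd) 0).2 e.2 (List.mem_map_of_mem he)
  have hm5 : m ≤ 5 := by
    rcases PySem.List.foldl_max_mem (E.map Prod.snd) 0 with h | h <;> rw [hm] at h
    · omega
    · simp only [List.mem_map] at h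
      obtain ⟨e, heE, he2⟩ := h
      exact he2 ▸ (pvEntries_count puzzle e heE).2.2
  -- the chosen bucket's list is, after sorting by a constant key, itself
  have hsorted : PySem.List.sorted ((E.filter (fun e => e.2 == m)).map Prod.fst)
      (fun coord => count_surrounded puzzle coord.1 coord.2) true
      = (E.filter (fun e => e.2 == m)).map Prod.fst := by
    apply PySem.List.sorted_rev_eq_self_of_pairwise
    apply List.pairwise_of_forall_mem_list
    intro a ha b hb
    have key : ∀ c ∈ (E.filter (fun e => e.2 == m)).map Prod.fst,
        count_surrounded puzzle c.1 c.2 = m := by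
      intro c hc
      simp only [List.mem_map, List.mem_filter, beq_iff_eq] at hc
      obtain ⟨e, ⟨heE, hem⟩, rfl⟩ := hc
      rw [← (pvEntries_count puzzle e heE).1, hem]
    rw [key a ha, key b hb]
  rw [hsorted]
  -- buckets above m are empty
  have hempty : ∀ c : Int, m < c → (E.filter (fun e => e.2 == c)).map Prod.fst = [] := by
    intro c hc
    rw [List.filter_eq_nil_iff.2 (fun e heE => by
      simp only [beq_iff_eq]; exact fun h => absurd (h ▸ hle e heE) (not_le.2 hc))]
    rfl
  -- bucket m is nonempty when 0 < m (the max is attained)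
  have hmem : 0 < m → (E.filter (fun e => e.2 == m)).map Prod.fst ≠ [] := by
    intro hpos
    rcases PySem.List.foldl_max_mem (E.map Prod.snd) 0 with h | h <;> rw [hm] at h
    · omega
    · simp only [List.mem_map] at h
      obtain ⟨e, heE, he2⟩ := h
      have hmemf : e ∈ E.filter (fun e => e.2 == m) := by
        simp [List.mem_filter, heE, he2]
      intro hnil
      have := List.mem_map_of_mem (f := Prod.fst) hmemf
      rw [hnil] at this
      exact absurd this (List.not_mem_nil)
  have h05 : m = 0 ∨ m = 1 ∨ m = 2 ∨ m = 3 ∨ m = 4 ∨ m = 5 := by omega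
  rcases h05 with h | h | h | h | h | h <;> subst h
  · simp [hempty 1 (by norm_num), hempty 2 (by norm_num), hempty 3 (by norm_num),
      hempty 4 (by norm_num), hempty 5 (by norm_num)]
  · simp [hempty 2 (by norm_num), hempty 3 (by norm_num), hempty 4 (by norm_num),
      hempty 5 (by norm_num), hmem (by norm_num)]
  · simp [hempty 3 (by norm_num), hempty 4 (by norm_num), hempty 5 (by norm_num),
      hmem (by norm_num)]
  · simp [hempty 4 (by norm_num), hempty 5 (by norm_num), hmem (by norm_num)]
  · simp [hempty 5 (by norm_num), hmem (by norm_num)]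
  · simp [hmem (by norm_num)]
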